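-- pv_equiv track=rewrite | github.com/grapheneaffiliate/h4-polytopic-attention | solve_batch20.py | solve_ce9e57f2
-- ===== SOURCE A (Python) =====
-- import copy
--
-- def solve_ce9e57f2(grid):
--     h, w = len(grid), len(grid[0])
--     out = copy.deepcopy(grid)
--
--     for c in range(w):
--         # Find cells with 2 in this column
--         twos = [(r, c) for r in range(h) if grid[r][c] == 2]
--         if not twos:
--             continue
--
--         height = len(twos)
--         num_twos = (height + 1) // 2  # ceil(h/2)
--
--         # Top num_twos stay as 2, rest become 8
--         for i, (r, _) in enumerate(twos):
--             if i >= num_twos: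
--                 out[r][c] = 8
--
--     return out
-- ===== SOURCE B (Python) =====
-- import copy
--
-- def solve_ce9e57f2(grid):
--     h, w = len(grid), len(grid[0])
--     out = copy.deepcopy(grid)
--     for c in range(w):
--         # budget = floor(n/2) where n = number of 2s in column c
--         budget = sum(1 for r in range(h) if grid[r][c] == 2) // 2
--         # mark the bottom `budget` twos, scanning upward
--         for r in range(h - 1, -1, -1):
--             if budget > 0 and grid[r][c] == 2:
--                 out[r][c] = 8
--                 budget -= 1
--     return out
-- ===== Notes on version B (the rewrite author's own statement) =====
-- stated objective: alternative
-- what changed: Per column, B replaces A's materialised list of 2-positions with enumerate-index-vs-ceil(n/2) comparison by a single decrementing budget floor(n/2) consumed while scanning the column bottom-up, marking each 2 met until the budget runs out.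
import Mathlib
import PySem

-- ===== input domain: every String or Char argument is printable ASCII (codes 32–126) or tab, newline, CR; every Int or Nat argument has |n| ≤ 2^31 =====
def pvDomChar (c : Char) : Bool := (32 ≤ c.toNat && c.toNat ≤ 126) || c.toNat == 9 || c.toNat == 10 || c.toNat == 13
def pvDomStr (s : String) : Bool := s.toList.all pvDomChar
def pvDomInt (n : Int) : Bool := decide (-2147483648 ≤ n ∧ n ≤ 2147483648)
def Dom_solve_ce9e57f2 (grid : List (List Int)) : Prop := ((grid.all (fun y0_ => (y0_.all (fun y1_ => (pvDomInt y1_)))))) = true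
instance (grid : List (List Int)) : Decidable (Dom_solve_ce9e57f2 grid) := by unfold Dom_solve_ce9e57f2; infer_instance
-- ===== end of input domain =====

-- B replaces A's per-column positional list of 2s (indices compared against ceil(n/2))
-- by a single decrementing budget floor(n/2) consumed while scanning the column bottom-up;
-- objective: alternative decomposition, same cost. deepcopy is kept, the input is not mutated.

-- ===== PORT A =====
-- out[r][c] = 8 (Python mutation of the copied grid)
def pvMark (c : Nat) (out : List (List Int)) (r : Nat) : List (List Int) :=
  out.modify r (fun row => row.set c 8)

-- body of A's `for c in range(w)` loop
def pvColA (grid : List (List Int)) (out : List (List Int)) (c : Nat) : List (List Int) :=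
  let h := grid.length
  let twos := (List.range h).filterMap (fun r =>
    if (grid.getD r []).getD c 0 = 2 then some (r, c) else none)
  if twos.isEmpty then out
  else
    let height := twos.length
    let num_twos := (height + 1) / 2
    (twos.foldl (fun (st : List (List Int) × Nat) rc =>
      (if st.2 ≥ num_twos then pvMark c st.1 rc.1 else st.1, st.2 + 1)) (out, 0)).1

def solve_ce9e57f2 (grid : List (List Int)) : List (List Int) :=
  let w := (grid.headD []).length
  (List.range w).foldl (pvColA grid) grid

-- ===== PORT B =====
-- body of B's `for c in range(w)` loop: count, then bottom-up budget scan
def pvColB (grid : List (List Int)) (out : List (List Int)) (c : Nat) : List (List Int) :=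
  let h := grid.length
  let budget := ((List.range h).filter (fun r => (grid.getD r []).getD c 0 = 2)).length / 2
  ((List.range h).reverse.foldl (fun (st : List (List Int) × Nat) r =>
    if 0 < st.2 ∧ (grid.getD r []).getD c 0 = 2 then (pvMark c st.1 r, st.2 - 1) else st)
    (out, budget)).1

def solve_ce9e57f2_alt (grid : List (List Int)) : List (List Int) :=
  let w := (grid.headD []).length
  (List.range w).foldl (pvColB grid) grid

-- ===== PRECONDITION & SPEC =====
-- Pre_ excludes exactly the inputs where Python A raises: the empty grid (grid[0] IndexError)
-- and ragged grids with some row shorter than the first row (grid[r][c] IndexError).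
def Pre_solve_ce9e57f2 (grid : List (List Int)) : Prop :=
  grid ≠ [] ∧ ∀ row ∈ grid, (grid.headD []).length ≤ row.length
instance (grid : List (List Int)) : Decidable (Pre_solve_ce9e57f2 grid) := by
  unfold Pre_solve_ce9e57f2; infer_instance

def pvWitness_solve_ce9e57f2 : List (List Int) := [[2, 0], [2, 2], [2, 2]]

def Spec_solve_ce9e57f2 (grid : List (List Int)) (out : List (List Int)) : Prop := out = solve_ce9e57f2_alt grid
instance (grid : List (List Int)) (out : List (List Int)) : Decidable (Spec_solve_ce9e57f2 grid out) := by unfold Spec_solve_ce9e57f2; infer_instance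

-- ===== CLAIM (what is proved, stated in full; the proofs are below) =====
def Claim_equal_solve_ce9e57f2 : Prop := ∀ (grid : List (List Int)), Dom_solve_ce9e57f2 grid → Pre_solve_ce9e57f2 grid → Spec_solve_ce9e57f2 grid (solve_ce9e57f2 grid)

-- ===== LEMMAS AND PROOFS =====

-- A's enumerate-with-guard fold marks exactly the suffix `l.drop (k - i)`.
theorem pv_enum_fold {α : Type} (m : List (List Int) → α → List (List Int)) (k : Nat) :
    ∀ (l : List α) (out : List (List Int)) (i : Nat),
    (l.foldl (fun (st : List (List Int) × Nat) a =>
      (if st.2 ≥ k then m st.1 a else st.1, st.2 + 1)) (out, i)).1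
    = (l.drop (k - i)).foldl m out := by
  intro l
  induction l with
  | nil => intro out i; simp
  | cons a l ih =>
    intro out i
    by_cases hi : i ≥ k
    · have hk : k - i = 0 := by omega
      have hk' : k - (i + 1) = 0 := by omega
      simp [List.foldl, hi, hk, ih, hk']
    · have hk : k - i = (k - (i + 1)) + 1 := by omega
      simp [List.foldl, hi, ih, hk]

-- B's budget fold marks exactly the first k elements satisfying p.
theorem pv_budget_fold (p : Nat → Prop) [DecidablePred p]
    (m : List (List Int) → Nat → List (List Int)) :
    ∀ (rs : List Nat) (out : List (List Int)) (k : Nat),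
    (rs.foldl (fun (st : List (List Int) × Nat) r =>
      if 0 < st.2 ∧ p r then (m st.1 r, st.2 - 1) else st) (out, k)).1
    = ((rs.filter (fun r => decide (p r))).take k).foldl m out := by
  intro rs
  induction rs with
  | nil => intro out k; simp
  | cons r rs ih =>
    intro out k
    by_cases hp : p r
    · cases k with
      | zero => simp [List.foldl, hp, ih]
      | succ k' => simp [List.foldl, hp, ih]
    · simp [List.foldl, hp, ih]

-- List.modify at two distinct indices commutes
theorem pv_modify_comm {α : Type} (f g : α → α) {i j : Nat} (h : i ≠ j) (l : List α) :
    (l.modify i f).modify j g = (l.modify j g).modify i f := by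
  apply List.ext_getElem?
  intro n
  simp [List.getElem?_modify]
  split_ifs with h1 h2
  · omega
  · cases l[n]? <;> simp
  · cases l[n]? <;> simp
  · rfl

-- a mark commutes past a fold of marks at other rows
theorem pv_mark_swap (c : Nat) :
    ∀ (L : List Nat) (out : List (List Int)) (a : Nat), (∀ x ∈ L, a ≠ x) →
    L.foldl (pvMark c) (pvMark c out a) = pvMark c (L.foldl (pvMark c) out) a := by
  intro L
  induction L with
  | nil => intro out a _; simp
  | cons x L ih =>
    intro out a h
    have hax : a ≠ x := h x (by simp)
    have hcomm : pvMark c (pvMark c out a) x = pvMark c (pvMark c out x) a := by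
      simp only [pvMark]
      rw [pv_modify_comm _ _ hax]
    simp only [List.foldl]
    rw [hcomm, ih _ _ (fun y hy => h y (by simp [hy]))]

-- on a list of pairwise-distinct rows, marking in reverse order gives the same grid
theorem pv_fold_reverse (c : Nat) :
    ∀ (L : List Nat), L.Nodup → ∀ (out : List (List Int)),
    L.reverse.foldl (pvMark c) out = L.foldl (pvMark c) out := by
  intro L
  induction L with
  | nil => intro _ out; simp
  | cons a L ih =>
    intro hnd out
    obtain ⟨ha, h2⟩ := List.nodup_cons.mp hnd
    have h1 : ∀ x ∈ L, a ≠ x := fun x hx he => ha (he ▸ hx)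
    calc (a :: L).reverse.foldl (pvMark c) out
        = (L.reverse ++ [a]).foldl (pvMark c) out := by simp
      _ = pvMark c (L.reverse.foldl (pvMark c) out) a := by simp [List.foldl_append]
      _ = pvMark c (L.foldl (pvMark c) out) a := by rw [ih h2]
      _ = L.foldl (pvMark c) (pvMark c out a) := (pv_mark_swap c L out a h1).symm
      _ = (a :: L).foldl (pvMark c) out := rfl

-- A's comprehension `[(r,c) for r in range(h) if …]` as filter-then-map
theorem pv_filterMap_if {α β : Type} (p : α → Prop) [DecidablePred p] (g : α → β) :
    ∀ (l : List α),
    l.filterMap (fun r => if p r then some (g r) else none)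
    = (l.filter (fun r => decide (p r))).map g := by
  intro l
  induction l with
  | nil => simp
  | cons a l ih => by_cases hp : p a <;> simp [hp, ih]

-- the common characterisation: both column bodies mark the bottom ⌊n/2⌋ twos
theorem pvColA_char (grid out : List (List Int)) (c : Nat) :
    pvColA grid out c =
    (((List.range grid.length).filter
        (fun r => decide ((grid.getD r []).getD c 0 = 2))).drop
      ((((List.range grid.length).filter
        (fun r => decide ((grid.getD r []).getD c 0 = 2))).length + 1) / 2)).foldl (pvMark c) out := by
  unfold pvColA
  dsimp only
  rw [pv_filterMap_if (fun r => (grid.getD r []).getD c 0 = 2) (fun r => (r, c))]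
  set T := (List.range grid.length).filter (fun r => decide ((grid.getD r []).getD c 0 = 2)) with hT
  by_cases hE : T = []
  · simp [hE]
  · rw [if_neg (by simp [hE])]
    simp only [List.length_map]
    rw [List.foldl_map]
    dsimp only
    rw [pv_enum_fold (fun o (r : Nat) => pvMark c o r) ((T.length + 1) / 2) T out 0]
    simp

theorem pvColB_char (grid out : List (List Int)) (c : Nat) :
    pvColB grid out c =
    (((List.range grid.length).filter
        (fun r => decide ((grid.getD r []).getD c 0 = 2))).drop
      ((((List.range grid.length).filter
        (fun r => decide ((grid.getD r []).getD c 0 = 2))).length + 1) / 2)).foldl (pvMark c) out := by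
  unfold pvColB
  dsimp only
  set T := (List.range grid.length).filter (fun r => decide ((grid.getD r []).getD c 0 = 2)) with hT
  rw [pv_budget_fold (fun r => (grid.getD r []).getD c 0 = 2) (pvMark c)
      (List.range grid.length).reverse out (T.length / 2)]
  rw [List.filter_reverse, ← hT, List.take_reverse]
  have hnum : T.length - T.length / 2 = (T.length + 1) / 2 := by omega
  rw [hnum]
  exact pv_fold_reverse c _ ((List.drop_sublist _ _).nodup ((List.nodup_range).filter _)) out

theorem pvCol_eq (grid : List (List Int)) : pvColA grid = pvColB grid := by
  funext out c
  rw [pvColA_char, pvColB_char]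

-- ===== VERDICT (by name: the statement is the Claim_ definition above) =====
theorem solve_ce9e57f2_spec : Claim_equal_solve_ce9e57f2 := by
  intro grid _ _
  unfold Spec_solve_ce9e57f2 solve_ce9e57f2 solve_ce9e57f2_alt
  rw [pvCol_eq]
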